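-- pv_equiv track=rewrite | github.com/SusannaDiV/shapesynth | data/utils/fulldecoder.py | auto_map_args
-- ===== SOURCE A (Python) =====
-- from typing import Dict
-- from collections import OrderedDict
-- from typing import Dict, List, Tuple
-- from typing import Dict, List, Tuple
-- from typing import Dict, List
-- from collections import OrderedDict
-- from typing import Dict
--
-- def auto_map_args(d: Dict, slots: OrderedDict):
--     """
--     Auto map a dict of data to a pre-defined slots
--
--     Args:
--         d: a dict of data
--         slots: pre-defined slots
--
--     Returns:
--         - a tuple of data, where the order of data corresponds to the key orders in slots
--     """
--     kwargs = OrderedDict()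
--     for key, val in slots.items():
--         kwargs[key] = val
--     for key, val in d.items():
--         kwargs[key] = val
--     args = tuple([v for _, v in kwargs.items()])
--     while len(args) > 0:
--         if args[-1] is None:
--             args = args[:-1]
--         else:
--             break
--     return args
-- ===== SOURCE B (Python) =====
-- def auto_map_args(d, slots):
--     """Single backward sweep: walk the merged key sequence from the right,
--     appending values only once a non-None has been seen (so trailing Nones
--     never enter), then reverse once. No merged dict, no slicing, no index walk."""
--     rev = []
--     for k, v in reversed(list(d.items())):
--         if k not in slots and (rev or v is not None):
--             rev.append(v)
--     for k, v in reversed(list(slots.items())):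
--         v = d.get(k, v)
--         if rev or v is not None:
--             rev.append(v)
--     rev.reverse()
--     return tuple(rev)
-- ===== Notes on version B (the rewrite author's own statement) =====
-- stated objective: alternative
-- what changed: B never materializes the merged OrderedDict or the full value tuple: it makes one backward sweep over d's extras and the slots, fusing the trailing-None strip into construction (a value is appended only once some non-None has been seen), then reverses once; A builds an OrderedDict, lists all values and strips by repeated args[:-1] slicing.
import Mathlib
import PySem

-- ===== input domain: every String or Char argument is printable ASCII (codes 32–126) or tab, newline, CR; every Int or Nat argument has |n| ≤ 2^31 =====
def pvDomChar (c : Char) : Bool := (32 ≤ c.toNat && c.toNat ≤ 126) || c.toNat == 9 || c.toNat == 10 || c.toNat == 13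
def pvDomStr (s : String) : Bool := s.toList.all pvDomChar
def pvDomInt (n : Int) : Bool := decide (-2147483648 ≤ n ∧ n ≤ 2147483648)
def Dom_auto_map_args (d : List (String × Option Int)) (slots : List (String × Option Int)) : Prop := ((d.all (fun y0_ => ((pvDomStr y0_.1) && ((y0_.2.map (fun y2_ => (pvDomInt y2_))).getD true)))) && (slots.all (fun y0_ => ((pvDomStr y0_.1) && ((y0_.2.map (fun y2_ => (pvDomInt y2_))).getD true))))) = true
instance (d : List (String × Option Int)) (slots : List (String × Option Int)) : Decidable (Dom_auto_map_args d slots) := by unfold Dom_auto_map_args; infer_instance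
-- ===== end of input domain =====

-- B makes one backward sweep over d's extras and the slots, fusing the trailing-None
-- strip into construction (append only once a non-None has been seen) and reversing once,
-- instead of A's merged OrderedDict plus repeated args[:-1] slicing (alternative strategy,
-- same return value).


-- ===== PORT A =====
-- the `while len(args) > 0: if args[-1] is None: args = args[:-1] else: break` loop
def stripTrailA (args : List (Option Int)) : List (Option Int) :=
  if 0 < args.length then
    if PySem.List.pyGet? args (-1) = some none then
      stripTrailA (PySem.List.slice args none (some (-1)))
    else args
  else args
termination_by args.length
decreasing_by
  rw [PySem.List.slice_to_neg_one]
  simpa [List.length_dropLast] using by omega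

def auto_map_args (d : List (String × Option Int)) (slots : List (String × Option Int)) : List (Option Int) :=
  let kwargs : PySem.Dict String (Option Int) :=
    slots.foldl (fun kw p => kw.insert p.1 p.2) PySem.Dict.empty
  let kwargs := d.foldl (fun kw p => kw.insert p.1 p.2) kwargs
  let args := kwargs.items.map (fun p => p.2)
  stripTrailA args

-- ===== PORT B =====
-- `for k, v in reversed(list(d.items())): if k not in slots and (rev or v is not None): rev.append(v)`
-- `for k, v in reversed(list(slots.items())): v = d.get(k, v); if rev or v is not None: rev.append(v)`
-- `rev.reverse()`
def auto_map_args_alt (d : List (String × Option Int)) (slots : List (String × Option Int)) : List (Option Int) :=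
  let sd := PySem.Dict.mk slots
  let dd := PySem.Dict.mk d
  let rev := d.reverse.foldl (fun rev p =>
    if !(sd.contains p.1) && (!rev.isEmpty || !(p.2 == none)) then rev ++ [p.2] else rev) []
  let rev := slots.reverse.foldl (fun rev p =>
    let v := dd.getD p.1 p.2
    if !rev.isEmpty || !(v == none) then rev ++ [v] else rev) rev
  rev.reverse

-- ===== PRECONDITION & SPEC =====
-- Pre_ excludes association lists with duplicate keys: a Python dict cannot contain
-- duplicate keys, so such lists represent no input of the Python function at all.
def Pre_auto_map_args (d : List (String × Option Int)) (slots : List (String × Option Int)) : Prop :=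
  (d.map Prod.fst).Nodup ∧ (slots.map Prod.fst).Nodup
instance (d : List (String × Option Int)) (slots : List (String × Option Int)) : Decidable (Pre_auto_map_args d slots) := by unfold Pre_auto_map_args; infer_instance

def pvWitness_auto_map_args : (List (String × Option Int)) × (List (String × Option Int)) :=
  ([("a", some 1)], [("a", none), ("b", some 2)])

def Spec_auto_map_args (d : List (String × Option Int)) (slots : List (String × Option Int)) (out : List (Option Int)) : Prop := out = auto_map_args_alt d slots
instance (d : List (String × Option Int)) (slots : List (String × Option Int)) (out : List (Option Int)) : Decidable (Spec_auto_map_args d slots out) := by unfold Spec_auto_map_args; infer_instance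

-- ===== CLAIM (what is proved, stated in full; the proofs are below) =====
def Claim_equal_auto_map_args : Prop := ∀ (d : List (String × Option Int)) (slots : List (String × Option Int)), Dom_auto_map_args d slots → Pre_auto_map_args d slots → Spec_auto_map_args d slots (auto_map_args d slots)

-- ===== LEMMAS AND PROOFS =====

-- B's appending step on the reversed accumulator, and its cons counterpart
def pvStepApp (v : Option Int) (acc : List (Option Int)) : List (Option Int) :=
  if acc = [] ∧ v = none then acc else acc ++ [v]

def pvStepCons (v : Option Int) (acc : List (Option Int)) : List (Option Int) :=
  if acc = [] ∧ v = none then acc else v :: acc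

-- the right fold that drops leading-from-the-right Nones
def pvRBuild (vals : List (Option Int)) : List (Option Int) := vals.foldr pvStepCons []

-- xs[-1] on a nonempty list is its last element
theorem pv_pyGet_neg_one (xs : List (Option Int)) (h : 0 < xs.length) :
    PySem.List.pyGet? xs (-1) = xs[xs.length - 1]? := by
  unfold PySem.List.pyGet? PySem.List.pyIdx?
  rw [if_neg (by norm_num), if_pos (by exact_mod_cast by omega)]
  norm_num

theorem pv_foldr_stepCons_ne_nil (ys acc : List (Option Int)) (h : acc ≠ []) :
    ys.foldr pvStepCons acc = ys ++ acc := by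
  induction ys with
  | nil => rfl
  | cons y t ih =>
    simp only [List.foldr_cons, ih, pvStepCons]
    rw [if_neg (by simp [h])]
    simp

-- A's while-loop of repeated args[:-1] computes B's right fold
theorem pv_strip_eq_rbuild (vals : List (Option Int)) :
    stripTrailA vals = pvRBuild vals := by
  induction vals using List.reverseRecOn with
  | nil => rw [stripTrailA]; rfl
  | append_singleton ys a ih =>
    have hpos : 0 < (ys ++ [a]).length := by simp
    have hlast : PySem.List.pyGet? (ys ++ [a]) (-1) = some a := by
      rw [pv_pyGet_neg_one _ hpos]
      simp
    rw [stripTrailA, if_pos hpos, hlast]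
    unfold pvRBuild
    rw [List.foldr_append]
    by_cases ha : a = none
    · rw [if_pos (by rw [ha]), PySem.List.slice_to_neg_one, List.dropLast_concat, ih]
      subst ha
      rfl
    · rw [if_neg (by simpa using ha)]
      have hstep : pvStepCons a [] = [a] := by
        unfold pvStepCons
        rw [if_neg (by simp [ha])]
      simp only [List.foldr_cons, List.foldr_nil, hstep]
      rw [pv_foldr_stepCons_ne_nil ys [a] (by simp)]

-- append-on-reverse is cons, pointwise and for the whole fold
theorem pv_stepApp_rev (v : Option Int) (X : List (Option Int)) :
    pvStepApp v X.reverse = (pvStepCons v X).reverse := by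
  unfold pvStepApp pvStepCons
  by_cases h : X = [] ∧ v = none
  · simp [h.1, h.2]
  · rw [if_neg (by simpa using h), if_neg h]
    simp

theorem pv_foldr_app_rev (vals acc : List (Option Int)) :
    vals.foldr pvStepApp acc = (vals.foldr pvStepCons acc.reverse).reverse := by
  induction vals with
  | nil => simp
  | cons v t ih =>
    rw [List.foldr_cons, List.foldr_cons, ih, pv_stepApp_rev]

-- the guarded loop body is `skip if in slots, else the plain step`
theorem pv_guard_fun (c : String → Bool) :
    (fun (p : String × Option Int) (acc : List (Option Int)) =>
        if !(c p.1) && (!acc.isEmpty || !(p.2 == none)) then acc ++ [p.2] else acc)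
      = (fun p acc => if c p.1 then acc else pvStepApp p.2 acc) := by
  funext p acc
  cases hb : c p.1 with
  | true => simp
  | false =>
    by_cases h : acc = [] ∧ p.2 = none
    · simp [pvStepApp, h.1, h.2]
    · rcases not_and_or.1 h with h1 | h2
      · simp [pvStepApp, h1]
      · simp [pvStepApp, h2]

-- the guarded first-loop fold is the filtered fold of the plain step
theorem pv_foldr_guard_filter (l : List (String × Option Int))
    (c : String → Bool) (acc : List (Option Int)) :
    l.foldr (fun p acc => if !(c p.1) && (!acc.isEmpty || !(p.2 == none)) then acc ++ [p.2] else acc) acc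
      = ((l.filter (fun p => !(c p.1))).map (fun p => p.2)).foldr pvStepApp acc := by
  rw [pv_guard_fun]
  induction l with
  | nil => rfl
  | cons p t ih =>
    simp only [List.foldr_cons, ih, List.filter_cons]
    by_cases hc : c p.1 = true
    · simp [hc]
    · simp [eq_false_of_ne_true hc]

-- (mk (q :: rest)).getD: first-match lookup step
theorem pv_getD_mk_cons (q : String × Option Int) (rest : List (String × Option Int))
    (k : String) (dflt : Option Int) :
    (PySem.Dict.mk (q :: rest)).getD k dflt
      = if q.1 == k then q.2 else (PySem.Dict.mk rest).getD k dflt := by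
  rw [PySem.Dict.getD_eq_get?_getD, PySem.Dict.getD_eq_get?_getD,
    show (q :: rest) = ((q.1, q.2) :: rest) by simp, PySem.Dict.get?_mk_cons]
  split <;> rfl

theorem pv_getD_not_mem (l : List (String × Option Int)) (k : String) (dflt : Option Int)
    (h : k ∉ l.map Prod.fst) : (PySem.Dict.mk l).getD k dflt = dflt := by
  rw [PySem.Dict.getD_eq_get?_getD,
    (PySem.Dict.get?_eq_none_iff_not_mem_keys (PySem.Dict.mk l) k).2 (by
      rwa [PySem.Dict.keys_mk])]
  rfl

-- the invariant of A's insertion loop: the items after folding l into mk D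
theorem pv_merge (l : List (String × Option Int)) (D : List (String × Option Int))
    (hl : (l.map Prod.fst).Nodup) :
    (l.foldl (fun kw p => kw.insert p.1 p.2) (PySem.Dict.mk D)).items
      = D.map (fun q => (q.1, (PySem.Dict.mk l).getD q.1 q.2))
        ++ l.filter (fun p => !((PySem.Dict.mk D).contains p.1)) := by
  induction l generalizing D with
  | nil =>
    simp [PySem.Dict.getD_eq_get?_getD, PySem.Dict.get?]
  | cons p t ih =>
    simp only [List.map_cons, List.nodup_cons] at hl
    obtain ⟨hp, ht⟩ := hl
    simp only [List.foldl_cons]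
    by_cases hc : (PySem.Dict.mk D).contains p.1 = true
    · have hins : (PySem.Dict.mk D).insert p.1 p.2
          = PySem.Dict.mk (D.map (fun q => if q.1 == p.1 then (p.1, p.2) else q)) := by
        unfold PySem.Dict.insert
        rw [if_pos hc]
      rw [hins, ih _ ht]
      have hkeys : ∀ k, (PySem.Dict.mk (D.map (fun q => if q.1 == p.1 then (p.1, p.2) else q))).contains k
          = (PySem.Dict.mk D).contains k := by
        intro k
        rw [PySem.Dict.contains_mk, PySem.Dict.contains_mk, List.any_map]
        refine PySem.List.any_congr_mem (fun q _ => ?_)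
        by_cases hq : (q.1 == p.1) = true
        · have hqeq : q.1 = p.1 := eq_of_beq hq
          simp [Function.comp, hqeq]
        · simp [Function.comp, hq]
      have hmap : (D.map (fun q => if q.1 == p.1 then (p.1, p.2) else q)).map
            (fun q => (q.1, (PySem.Dict.mk t).getD q.1 q.2))
          = D.map (fun q => (q.1, (PySem.Dict.mk (p :: t)).getD q.1 q.2)) := by
        rw [List.map_map]
        refine List.map_congr_left (fun q _ => ?_)
        by_cases hq : (q.1 == p.1) = true
        · have hqeq : q.1 = p.1 := eq_of_beq hq
          simp only [Function.comp, hq, if_true]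
          rw [pv_getD_not_mem t p.1 p.2 hp, pv_getD_mk_cons]
          rw [if_pos (by simp [hqeq]), hqeq]
        · have hpq : ¬ ((p.1 == q.1) = true) := fun hh =>
            hq (beq_iff_eq.mpr (beq_iff_eq.mp hh).symm)
          simp only [Function.comp, hq]
          rw [pv_getD_mk_cons, if_neg hpq]
          simp
      have hfil : t.filter (fun x => !((PySem.Dict.mk (D.map (fun q => if q.1 == p.1 then (p.1, p.2) else q))).contains x.1))
          = (p :: t).filter (fun x => !((PySem.Dict.mk D).contains x.1)) := by
        rw [List.filter_cons, if_neg (by simp [hc])]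
        exact List.filter_congr (fun x _ => by rw [hkeys])
      rw [hmap, hfil]
    · have hcf : (PySem.Dict.mk D).contains p.1 = false := eq_false_of_ne_true hc
      have hins : (PySem.Dict.mk D).insert p.1 p.2 = PySem.Dict.mk (D ++ [p]) := by
        unfold PySem.Dict.insert
        rw [if_neg (by rw [hcf]; simp)]
      rw [hins, ih _ ht, List.map_append]
      have hmap : D.map (fun q => (q.1, (PySem.Dict.mk t).getD q.1 q.2))
          = D.map (fun q => (q.1, (PySem.Dict.mk (p :: t)).getD q.1 q.2)) := by
        have hD : ∀ x ∈ D, (x.1 == p.1) = false := by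
          have h1 := hcf
          rw [PySem.Dict.contains_mk, List.any_eq_false] at h1
          intro x hx
          simpa using h1 x hx
        refine List.map_congr_left (fun q hq => ?_)
        have hqp : ¬ ((p.1 == q.1) = true) := fun hh => by
          have h2 := hD q hq
          rw [beq_iff_eq] at hh
          rw [hh] at h2
          simp at h2
        rw [pv_getD_mk_cons, if_neg hqp]
      have hsing : [p].map (fun q => (q.1, (PySem.Dict.mk t).getD q.1 q.2)) = [p] := by
        simp only [List.map_cons, List.map_nil]
        rw [pv_getD_not_mem t p.1 p.2 hp]
      have hfil : t.filter (fun x => !((PySem.Dict.mk (D ++ [p])).contains x.1))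
          = t.filter (fun x => !((PySem.Dict.mk D).contains x.1)) := by
        refine List.filter_congr (fun x hx => ?_)
        have hpx : (p.1 == x.1) = false := by
          rw [beq_eq_false_iff_ne]
          intro h
          exact hp (by rw [h]; exact List.mem_map_of_mem hx)
        rw [PySem.Dict.contains_mk, PySem.Dict.contains_mk, List.any_append]
        simp [hpx]
      rw [hmap, hsing, hfil, List.filter_cons, if_pos (by simp [hcf]), List.append_assoc]
      rfl

-- A's kwargs after the slots loop is exactly the slots dict
theorem pv_slots_fold (slots : List (String × Option Int))
    (hs : (slots.map Prod.fst).Nodup) :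
    slots.foldl (fun kw p => kw.insert p.1 p.2) PySem.Dict.empty = PySem.Dict.mk slots := by
  have h := pv_merge slots [] hs
  simp only [List.map_nil, List.nil_append] at h
  have hfil : slots.filter (fun p => !((PySem.Dict.mk ([] : List (String × Option Int))).contains p.1)) = slots := by
    refine List.filter_eq_self.2 (fun x _ => ?_)
    rw [PySem.Dict.contains_mk]
    simp
  rw [hfil] at h
  exact congrArg PySem.Dict.mk h

-- the second-loop body is the plain step on the looked-up value
theorem pv_slot_fun (d : List (String × Option Int)) :
    (fun (x : String × Option Int) (y : List (Option Int)) =>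
        if !y.isEmpty || !((PySem.Dict.mk d).getD x.1 x.2 == none) then y ++ [(PySem.Dict.mk d).getD x.1 x.2] else y)
      = (fun x y => pvStepApp ((PySem.Dict.mk d).getD x.1 x.2) y) := by
  funext x y
  by_cases h : y = [] ∧ (PySem.Dict.mk d).getD x.1 x.2 = none
  · simp [pvStepApp, h.1, h.2]
  · rcases not_and_or.1 h with h1 | h2
    · simp [pvStepApp, h1]
    · simp [pvStepApp, h2]

-- ===== VERDICT (by name: the statement is the Claim_ definition above) =====
theorem auto_map_args_spec : Claim_equal_auto_map_args := by
  intro d slots _ hpre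
  obtain ⟨hd, hs⟩ := hpre
  show auto_map_args d slots = auto_map_args_alt d slots
  unfold auto_map_args auto_map_args_alt
  simp only [List.foldl_reverse]
  rw [pv_slots_fold slots hs, pv_merge d slots hd, pv_strip_eq_rbuild]
  rw [pv_foldr_guard_filter d (fun k => (PySem.Dict.mk slots).contains k)]
  rw [pv_foldr_app_rev]
  rw [pv_slot_fun d, ← List.foldr_map, pv_foldr_app_rev]
  simp only [List.reverse_reverse, List.reverse_nil]
  unfold pvRBuild
  simp only [List.map_append, List.foldr_append, List.map_map]
  rfl
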